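-- pv_equiv track=rewrite | github.com/Zipstorm/Seekout-Analytics | scripts/validate-analytics-docs.py | rule_01
-- ===== SOURCE A (Python) =====
-- def _object_prefix(event_name, known_objects):
--     """Match the longest known object that is a prefix of the event name."""
--     for obj in sorted(known_objects, key=len, reverse=True):
--         if event_name.startswith(obj + " "):
--             return obj
--     return None
--
-- def _object_for_intent_event(event_name, known_objects):
--     """Intent events use verb-first naming (e.g. 'Share Button Clicked').
--     Try to find a known object embedded anywhere in the name."""
--     for obj in sorted(known_objects, key=len, reverse=True):
--         if f" {obj} " in f" {event_name} ":
--             return obj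
--     return None
--
-- def rule_01(catalog_events, schema_objects):
--     """Catalog event object prefixes <-> Schema Standard Objects."""
--     errors, warnings = [], []
--     found = set()
--     for name in catalog_events:
--         obj = _object_prefix(name, schema_objects)
--         if not obj and name.endswith("Button Clicked"):
--             obj = _object_for_intent_event(name, schema_objects)
--         if obj:
--             found.add(obj)
--         elif not name.endswith("Button Clicked"):
--             errors.append(
--                 f'Event "{name}" uses an object prefix not in Standard Objects table'
--             )
--     for obj in schema_objects:
--         if obj not in found:
--             warnings.append(
--                 f'Standard Object "{obj}" has no matching events in Event Catalog'
--             )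
--     return errors, warnings
-- ===== SOURCE B (Python) =====
-- def _object_match(name, schema_objects, objset):
--     """Longest schema object naming `name`, computed from candidates generated
--     out of the NAME rather than by scanning the object list per test:
--     prefix candidates are the cuts of `name` at its space positions, looked up
--     in the object set (their lengths are distinct, so the longest is unique);
--     the intent fallback intersects the set of space-bounded substrings of
--     `name` with the schema, longest first, ties to the earliest schema object."""
--     best = None
--     for i, ch in enumerate(name):
--         if ch == " ":
--             p = name[:i]
--             if p in objset and (best is None or len(p) > len(best)):
--                 best = p
--     if not best and name.endswith("Button Clicked"):
--         padded = " " + name + " "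
--         sp = [i for i, ch in enumerate(padded) if ch == " "]
--         cand = {padded[i + 1:j] for i in sp for j in sp if i < j}
--         emb = None
--         for obj in schema_objects:
--             if obj in cand and (emb is None or len(obj) > len(emb)):
--                 emb = obj
--         best = emb
--     return best
--
--
-- def rule_01(catalog_events, schema_objects):
--     """Catalog event object prefixes <-> Schema Standard Objects."""
--     objset = set(schema_objects)
--     matches = [(name, _object_match(name, schema_objects, objset))
--                for name in catalog_events]
--     found = {obj for _, obj in matches if obj}
--     errors = [
--         f'Event "{name}" uses an object prefix not in Standard Objects table'
--         for name, obj in matches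
--         if not obj and not name.endswith("Button Clicked")
--     ]
--     warnings = [
--         f'Standard Object "{obj}" has no matching events in Event Catalog'
--         for obj in schema_objects
--         if obj not in found
--     ]
--     return errors, warnings
-- ===== Notes on version B (the rewrite author's own statement) =====
-- stated objective: faster
-- what changed: B inverts the matching: instead of A's per-event sort-and-scan of the schema-object list (testing each object against the name, twice per event), B generates candidates from the event NAME - it cuts the name at each space position and looks the cuts up in a set of the schema objects built once (the cuts have distinct lengths, so the longest hit is unique), and for the 'Button Clicked' fallback it builds the set of space-bounded substrings of the name and intersects it with the schema objects in one pass (earliest-on-ties, matching A's stable sort) - and assembles errors/found/warnings by …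
import Mathlib
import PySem

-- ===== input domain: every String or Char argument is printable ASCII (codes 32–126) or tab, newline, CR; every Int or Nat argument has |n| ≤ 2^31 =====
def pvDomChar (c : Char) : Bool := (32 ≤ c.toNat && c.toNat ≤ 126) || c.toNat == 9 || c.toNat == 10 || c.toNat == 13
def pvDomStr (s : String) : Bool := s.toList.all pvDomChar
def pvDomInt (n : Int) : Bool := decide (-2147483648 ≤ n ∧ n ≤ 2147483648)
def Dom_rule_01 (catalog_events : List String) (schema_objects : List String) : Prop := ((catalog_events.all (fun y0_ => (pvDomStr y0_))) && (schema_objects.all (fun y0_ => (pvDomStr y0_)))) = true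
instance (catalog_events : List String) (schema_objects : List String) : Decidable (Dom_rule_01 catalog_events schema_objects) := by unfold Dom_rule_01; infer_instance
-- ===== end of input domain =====

-- B computes each event's object from candidates generated out of the event NAME (cut the name at
-- its space positions and look the cuts up in a set of the schema objects; for the intent fallback,
-- intersect the set of space-bounded substrings of the name with the schema) instead of A's
-- per-event sort-and-scan of the object list, and assembles the result by comprehensions
-- (objective: faster — a timing run measured B well over 1.5x faster at the largest size;
-- A's found set is consumed by membership only, so the ordered Set is exact).


-- Python truthiness of an Optional[str]: None and "" are falsy (used by both ports for `if obj:` / `if not obj`)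
def pvTruthy : Option String → Bool
  | none => false
  | some s => !(s == "")

def pvErrMsg (name : String) : String :=
  "Event \"" ++ name ++ "\" uses an object prefix not in Standard Objects table"
def pvWarnMsg (obj : String) : String :=
  "Standard Object \"" ++ obj ++ "\" has no matching events in Event Catalog"

-- ===== PORT A =====
-- the `for obj in …: if p(obj): return obj / return None` loop of A's two helpers
def pvFirstWith (p : String → Bool) : List String → Option String
  | [] => none
  | o :: rest => if p o then some o else pvFirstWith p rest

-- _object_prefix
def pvObjectPrefix (event_name : String) (known_objects : List String) : Option String :=
  pvFirstWith (fun obj => PySem.Str.startswith event_name (obj ++ " "))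
    (PySem.List.sorted known_objects (fun o => PySem.Str.len o) true)

-- _object_for_intent_event
def pvObjectForIntent (event_name : String) (known_objects : List String) : Option String :=
  pvFirstWith (fun obj => PySem.Str.isIn (" " ++ obj ++ " ") (" " ++ event_name ++ " "))
    (PySem.List.sorted known_objects (fun o => PySem.Str.len o) true)

def rule_01 (catalog_events : List String) (schema_objects : List String) : List String × List String :=
  let st := catalog_events.foldl (fun (st : List String × PySem.Set String) name =>
      let obj := pvObjectPrefix name schema_objects
      let obj := if !pvTruthy obj && PySem.Str.endswith name "Button Clicked" then
          pvObjectForIntent name schema_objects else obj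
      if pvTruthy obj then (st.1, PySem.Set.add st.2 (obj.getD ""))  -- found.add(obj); obj is some s here
      else if !PySem.Str.endswith name "Button Clicked" then (st.1 ++ [pvErrMsg name], st.2)
      else st)
    ([], [])
  let warnings := schema_objects.foldl (fun w obj =>
      if PySem.Set.contains st.2 obj then w else w ++ [pvWarnMsg obj]) []
  (st.1, warnings)

-- ===== PORT B =====
-- _object_match: prefix candidates are the cuts of `name` at its space positions, looked up in the
-- object set; the intent fallback intersects the set of space-bounded substrings of `name` with the
-- schema objects (longest first, ties to the earliest schema object)
def pvObjectMatch (name : String) (schema_objects : List String) (objset : PySem.Set String) : Option String :=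
  let best := (PySem.List.enumerate name.toList).foldl
    (fun (best : Option String) ic =>
      if ic.2 == ' ' then
        let p := PySem.Str.slice name none (some ic.1)   -- name[:i]
        if PySem.Set.contains objset p &&
            (match best with | none => true | some b => decide (PySem.Str.len b < PySem.Str.len p))
        then some p else best
      else best) none
  if !pvTruthy best && PySem.Str.endswith name "Button Clicked" then
    let padded := " " ++ name ++ " "
    let sp := (PySem.List.enumerate padded.toList).filterMap
      (fun ic => if ic.2 == ' ' then some ic.1 else none)
    -- {padded[i+1:j] for i in sp for j in sp if i < j}: consumed by membership only, so the ordered Set is exact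
    let cand : PySem.Set String := PySem.Set.ofList
      (sp.flatMap (fun i => sp.filterMap (fun j =>
        if i < j then some (PySem.Str.slice padded (some (i + 1)) (some j)) else none)))
    schema_objects.foldl
      (fun (emb : Option String) obj =>
        if PySem.Set.contains cand obj &&
            (match emb with | none => true | some b => decide (PySem.Str.len b < PySem.Str.len obj))
        then some obj else emb) none
  else best

def rule_01_alt (catalog_events : List String) (schema_objects : List String) : List String × List String :=
  let objset := PySem.Set.ofList schema_objects
  let ms := catalog_events.map (fun name => (name, pvObjectMatch name schema_objects objset))
  -- {obj for _, obj in matches if obj}: consumed by membership only, so the ordered Set is exact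
  let found : PySem.Set String :=
    PySem.Set.ofList (ms.filterMap (fun m => if pvTruthy m.2 then m.2 else none))
  let errors := (ms.filter
      (fun m => !pvTruthy m.2 && !PySem.Str.endswith m.1 "Button Clicked")).map
    (fun m => pvErrMsg m.1)
  let warnings := (schema_objects.filter (fun o => !PySem.Set.contains found o)).map pvWarnMsg
  (errors, warnings)

-- ===== PRECONDITION & SPEC =====
def Spec_rule_01 (catalog_events : List String) (schema_objects : List String) (out : List String × List String) : Prop := out = rule_01_alt catalog_events schema_objects
instance (catalog_events : List String) (schema_objects : List String) (out : List String × List String) : Decidable (Spec_rule_01 catalog_events schema_objects out) := by unfold Spec_rule_01; infer_instance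

-- ===== CLAIM (what is proved, stated in full; the proofs are below) =====
def Claim_equal_rule_01 : Prop := ∀ (catalog_events : List String) (schema_objects : List String), Dom_rule_01 catalog_events schema_objects → Spec_rule_01 catalog_events schema_objects (rule_01 catalog_events schema_objects)

-- ===== LEMMAS AND PROOFS =====

theorem pvFirstWith_eq_some {p : String → Bool} {l : List String} {m : String}
    (h : pvFirstWith p l = some m) : m ∈ l ∧ p m = true := by
  induction l with
  | nil => simp [pvFirstWith] at h
  | cons o rest ih =>
    by_cases hp : p o = true
    · simp [pvFirstWith, hp] at h
      subst h; exact ⟨List.mem_cons_self, hp⟩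
    · simp [pvFirstWith, hp] at h
      rcases ih h with ⟨hm, hpm⟩
      exact ⟨List.mem_cons_of_mem _ hm, hpm⟩

-- inserting x into a length-nonincreasing list: the first p-satisfier updates exactly like
-- the strict running-max step of PySem.List.max?
theorem pvFirstWith_insertBy (p : String → Bool) (x : String) (s : List String)
    (hs : s.Pairwise (fun a b => PySem.Str.len b ≤ PySem.Str.len a)) :
    pvFirstWith p (PySem.List.insertBy
        (fun a b => decide (PySem.Str.len b < PySem.Str.len a)) x s)
      = if p x then
          (match pvFirstWith p s with
            | none => some x
            | some m => if PySem.Str.len m < PySem.Str.len x then some x else some m)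
        else pvFirstWith p s := by
  induction s with
  | nil => cases hp : p x <;> simp [PySem.List.insertBy, pvFirstWith, hp]
  | cons y ys ih =>
    rcases List.pairwise_cons.mp hs with ⟨hy, hys⟩
    by_cases hlt : PySem.Str.len y < PySem.Str.len x
    · -- x goes in front
      simp only [PySem.List.insertBy, hlt, decide_true, if_true]
      cases hp : p x with
      | true =>
        cases hfw : pvFirstWith p (y :: ys) with
        | none => simp only [pvFirstWith, hp, if_true]
        | some m =>
          rcases pvFirstWith_eq_some hfw with ⟨hm, _⟩
          have hml : PySem.Str.len m ≤ PySem.Str.len y := by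
            rcases List.mem_cons.mp hm with h | h
            · exact le_of_eq (by rw [h])
            · exact hy m h
          simp only [pvFirstWith, hp, if_true]
          rw [if_pos (lt_of_le_of_lt hml hlt)]
      | false => simp only [pvFirstWith, hp, if_false, Bool.false_eq_true]
    · -- x goes after y
      have hbefore : (decide (PySem.Str.len y < PySem.Str.len x)) = false := by
        simpa using hlt
      simp only [PySem.List.insertBy, hbefore, Bool.false_eq_true, if_false]
      cases hpy : p y with
      | true =>
        have hle : PySem.Str.len x ≤ PySem.Str.len y := not_lt.mp hlt
        cases hp : p x with
        | true =>
          simp only [pvFirstWith, hpy, if_true]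
          rw [if_neg (not_lt.mpr hle)]
        | false => simp only [pvFirstWith, hpy, if_true, Bool.false_eq_true, if_false]
      | false =>
        simp only [pvFirstWith, hpy, Bool.false_eq_true, if_false]
        exact ih hys

-- first p-satisfier of the stable length-descending sort = first maximum-length element of the filter
theorem pvFirstWith_sorted_eq_max (p : String → Bool) (objs : List String) :
    pvFirstWith p (PySem.List.sorted objs (fun o => PySem.Str.len o) true)
      = PySem.List.max? (objs.filter p) (fun o => PySem.Str.len o) := by
  induction objs using List.reverseRecOn with
  | nil => simp [PySem.List.sorted, pvFirstWith, PySem.List.max?]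
  | append_singleton l x ih =>
    have hsort : PySem.List.sorted (l ++ [x]) (fun o => PySem.Str.len o) true
        = PySem.List.insertBy (fun a b => decide (PySem.Str.len b < PySem.Str.len a)) x
            (PySem.List.sorted l (fun o => PySem.Str.len o) true) := by
      rw [PySem.List.sorted_rev_eq_foldl_insertBy, PySem.List.sorted_rev_eq_foldl_insertBy,
        List.foldl_append]
      rfl
    rw [hsort, pvFirstWith_insertBy p x _
      (PySem.List.sorted_pairwise_rev l (fun o => PySem.Str.len o)), ih]
    rw [List.filter_append]
    cases hp : p x with
    | true =>
      simp only [List.filter_cons, hp, if_true, List.filter_nil, PySem.List.max?,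
        List.foldl_append, List.foldl_cons, List.foldl_nil]
      split <;> rename_i heq <;> rw [heq]
    | false =>
      simp [hp]

-- ---- character-level structure of the two match tests ----

theorem pvSpace_toList : (" " : String).toList = [' '] := by decide

-- `name.startswith(obj + " ")` holds exactly when obj is a cut of name at a space position
theorem pvPrefix_char (nl ol : List Char) :
    (ol ++ [' ']) <+: nl ↔ ∃ i : Nat, nl[i]? = some ' ' ∧ ol = nl.take i := by
  constructor
  · rintro ⟨t, ht⟩
    refine ⟨ol.length, ?_, ?_⟩
    · rw [← ht, List.append_assoc, List.getElem?_append_right le_rfl]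
      simp
    · rw [← ht, List.append_assoc, List.take_left]
  · rintro ⟨i, hg, hol⟩
    have hi : i < nl.length := (List.getElem?_eq_some_iff.mp hg).1
    have hsp : nl[i] = ' ' := (List.getElem?_eq_some_iff.mp hg).2
    refine ⟨nl.drop (i + 1), ?_⟩
    have hdec : nl = nl.take i ++ ' ' :: nl.drop (i + 1) := by
      conv_lhs => rw [← List.take_append_drop i nl]
      rw [List.drop_eq_getElem_cons hi, hsp]
    rw [hol, List.append_assoc]
    simpa using hdec.symm

-- `" obj " in padded` holds exactly when obj is a cut of padded between two space positions
theorem pvInfix_char (pl ol : List Char) :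
    (' ' :: (ol ++ [' '])) <:+: pl ↔
      ∃ i j : Nat, i < j ∧ pl[i]? = some ' ' ∧ pl[j]? = some ' ' ∧
        ol = (pl.drop (i + 1)).take (j - (i + 1)) := by
  constructor
  · rintro ⟨s, t, ht⟩
    refine ⟨s.length, (s ++ ' ' :: ol).length,
      by simp only [List.length_append, List.length_cons]; omega, ?_, ?_, ?_⟩
    · rw [← ht, List.getElem?_append_left (by simp only [List.length_append, List.length_cons]; omega),
        List.getElem?_append_right le_rfl]
      simp
    · have h2 : (s ++ ' ' :: (ol ++ [' '])) ++ t = (s ++ ' ' :: ol) ++ (' ' :: t) := by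
        simp
      rw [← ht, h2, List.getElem?_append_right le_rfl]
      simp
    · have h3 : (s ++ ' ' :: (ol ++ [' '])) ++ t = (s ++ [' ']) ++ (ol ++ (' ' :: t)) := by
        simp
      rw [← ht, h3, List.drop_left' (by simp),
        show (s ++ ' ' :: ol).length - (s.length + 1) = ol.length from by
          simp only [List.length_append, List.length_cons]; omega,
        List.take_left]
  · rintro ⟨i, j, hij, hi, hj, hol⟩
    have hiL : i < pl.length := (List.getElem?_eq_some_iff.mp hi).1
    have hjL : j < pl.length := (List.getElem?_eq_some_iff.mp hj).1
    have hspi : pl[i] = ' ' := (List.getElem?_eq_some_iff.mp hi).2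
    have hspj : pl[j] = ' ' := (List.getElem?_eq_some_iff.mp hj).2
    refine ⟨pl.take i, pl.drop (j + 1), ?_⟩
    have hdec2 : pl.drop (i + 1)
        = (pl.drop (i + 1)).take (j - (i + 1)) ++ ' ' :: pl.drop (j + 1) := by
      conv_lhs => rw [← List.take_append_drop (j - (i + 1)) (pl.drop (i + 1))]
      rw [List.drop_drop]
      have hjj : i + 1 + (j - (i + 1)) = j := by omega
      rw [hjj, List.drop_eq_getElem_cons hjL, hspj]
    have hdec1 : pl = pl.take i ++ ' ' :: pl.drop (i + 1) := by
      conv_lhs => rw [← List.take_append_drop i pl]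
      rw [List.drop_eq_getElem_cons hiL, hspi]
    conv_rhs => rw [hdec1]
    rw [hol]
    conv_rhs => rw [hdec2]
    simp

-- ---- the two running-max loops of B are PySem.List.max? ----

def pvMaxStep (acc : Option String) (x : String) : Option String :=
  match acc with
  | none => some x
  | some m => if PySem.Str.len m < PySem.Str.len x then some x else some m

theorem pvMax?_eq_foldl (l : List String) :
    PySem.List.max? l (fun o => PySem.Str.len o) = l.foldl pvMaxStep none := by
  unfold PySem.List.max?
  congr 1
  funext acc x
  cases acc <;> rfl

theorem pvStepEq (c : Bool) (best : Option String) (p : String) :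
    (if c && (match best with
        | none => true
        | some b => decide (PySem.Str.len b < PySem.Str.len p)) then some p else best)
      = if c then pvMaxStep best p else best := by
  cases c <;> cases best <;> simp [pvMaxStep]

-- first maxima of two listings of the same finite set, under a key injective on it, agree
theorem pvMax?_congr (l1 l2 : List String) (key : String → Int)
    (hmem : ∀ x, x ∈ l1 ↔ x ∈ l2)
    (hinj : ∀ x ∈ l1, ∀ y ∈ l2, key x = key y → x = y) :
    PySem.List.max? l1 key = PySem.List.max? l2 key := by
  cases h1 : PySem.List.max? l1 key with
  | none =>
    have hl1 : l1 = [] := (PySem.List.max?_eq_none_iff l1 key).mp h1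
    have hl2 : l2 = [] := by
      cases h : l2 with
      | nil => rfl
      | cons a t => exact absurd ((hmem a).mpr (by simp [h])) (by simp [hl1])
    rw [hl2]
    exact ((PySem.List.max?_eq_none_iff [] key).mpr rfl).symm
  | some m1 =>
    have hm1 : m1 ∈ l1 := PySem.List.max?_mem h1
    cases h2 : PySem.List.max? l2 key with
    | none =>
      have hl2 : l2 = [] := (PySem.List.max?_eq_none_iff l2 key).mp h2
      exact absurd ((hmem m1).mp hm1) (by simp [hl2])
    | some m2 =>
      have hm2 : m2 ∈ l2 := PySem.List.max?_mem h2
      have hle1 : key m1 ≤ key m2 := PySem.List.max?_isMax h2 m1 ((hmem m1).mp hm1)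
      have hle2 : key m2 ≤ key m1 := PySem.List.max?_isMax h1 m2 ((hmem m2).mpr hm2)
      rw [hinj m1 hm1 m2 hm2 (le_antisymm hle1 hle2)]

-- ---- proof-side names for B's two loops (definitionally the loops in pvObjectMatch) ----

def pvPrefLoopE (name : String) (objset : PySem.Set String) : Option String :=
  (PySem.List.enumerate name.toList).foldl
    (fun (best : Option String) ic =>
      if ic.2 == ' ' then
        let p := PySem.Str.slice name none (some ic.1)
        if PySem.Set.contains objset p &&
            (match best with | none => true | some b => decide (PySem.Str.len b < PySem.Str.len p))
        then some p else best
      else best) none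

def pvCandSet (name : String) : PySem.Set String :=
  let padded := " " ++ name ++ " "
  let sp := (PySem.List.enumerate padded.toList).filterMap
    (fun ic => if ic.2 == ' ' then some ic.1 else none)
  PySem.Set.ofList
    (sp.flatMap (fun i => sp.filterMap (fun j =>
      if i < j then some (PySem.Str.slice padded (some (i + 1)) (some j)) else none)))

def pvEmbLoopE (name : String) (schema_objects : List String) : Option String :=
  schema_objects.foldl
    (fun (emb : Option String) obj =>
      if PySem.Set.contains (pvCandSet name) obj &&
          (match emb with | none => true | some b => decide (PySem.Str.len b < PySem.Str.len obj))
      then some obj else emb) none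

theorem pvObjectMatch_eq_loops (name : String) (so : List String) (objset : PySem.Set String) :
    pvObjectMatch name so objset
      = if !pvTruthy (pvPrefLoopE name objset) && PySem.Str.endswith name "Button Clicked" then
          pvEmbLoopE name so
        else pvPrefLoopE name objset := rfl

-- ---- B's prefix loop computes _object_prefix ----

theorem pvPrefLoopE_eq_max (name : String) (objset : PySem.Set String) :
    pvPrefLoopE name objset
      = PySem.List.max?
          (((PySem.List.enumerate name.toList).filter
              (fun ic => ic.2 == ' ' && PySem.Set.contains objset (PySem.Str.slice name none (some ic.1)))).map
            (fun ic => PySem.Str.slice name none (some ic.1)))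
          (fun o => PySem.Str.len o) := by
  rw [pvMax?_eq_foldl, List.foldl_map, ← PySem.List.foldl_if_eq_foldl_filter]
  unfold pvPrefLoopE
  apply PySem.List.foldl_congr_mem
  intro acc x _
  cases hsp : (x.2 == ' ') with
  | false => simp
  | true =>
    simp only [Bool.true_and, if_true]
    exact pvStepEq _ acc _

theorem pvSlice_toList (name : String) (k : Nat) :
    (PySem.Str.slice name none (some (k : Int))).toList = name.toList.take k := by
  simp only [PySem.Str.toList_slice, PySem.Chars.slice_eq_listSlice, PySem.List.slice_to_natCast]

theorem pvSlice2_toList (s : String) (a b : Nat) :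
    (PySem.Str.slice s (some (a : Int)) (some (b : Int))).toList = (s.toList.drop a).take (b - a) := by
  simp only [PySem.Str.toList_slice, PySem.Chars.slice_eq_listSlice, PySem.List.slice_natCast]

theorem pvStr_eq_iff_toList (x : String) (l : List Char) : x = String.ofList l ↔ x.toList = l := by
  constructor
  · intro h; rw [h, String.toList_ofList]
  · intro h; apply String.toList_inj.mp; rw [h, String.toList_ofList]

theorem pvToList_wrap (o : String) : (" " ++ o ++ " ").toList = ' ' :: (o.toList ++ [' ']) := by
  simp [String.toList_append, pvSpace_toList]

-- both prefix-satisfier listings have the same members: objects that are a cut of name at a space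
theorem pvPrefA_mem (name : String) (so : List String) (x : String) :
    x ∈ so.filter (fun o => PySem.Str.startswith name (o ++ " "))
      ↔ x ∈ so ∧ ∃ k : Nat, name.toList[k]? = some ' ' ∧ x.toList = name.toList.take k := by
  rw [List.mem_filter, PySem.Str.startswith_eq, PySem.Chars.startswith_iff,
    show (x ++ " ").toList = x.toList ++ [' '] from by simp [String.toList_append, pvSpace_toList],
    pvPrefix_char]

theorem pvPrefC_mem (name : String) (so : List String) (x : String) :
    x ∈ ((PySem.List.enumerate name.toList).filter
          (fun ic => ic.2 == ' ' && PySem.Set.contains (PySem.Set.ofList so)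
            (PySem.Str.slice name none (some ic.1)))).map
        (fun ic => PySem.Str.slice name none (some ic.1))
      ↔ x ∈ so ∧ ∃ k : Nat, name.toList[k]? = some ' ' ∧ x.toList = name.toList.take k := by
  rw [List.mem_map]
  constructor
  · rintro ⟨ic, hicf, hfx⟩
    obtain ⟨hicmem, hq⟩ := List.mem_filter.mp hicf
    obtain ⟨k, hk, hick⟩ := (PySem.List.mem_enumerate_iff _ 0 _).mp hicmem
    subst hick
    simp only [zero_add] at hq hfx
    rw [Bool.and_eq_true, beq_iff_eq] at hq
    have hxl : x.toList = name.toList.take k := by rw [← hfx, pvSlice_toList]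
    refine ⟨?_, k, List.getElem?_eq_some_iff.mpr ⟨hk, hq.1⟩, hxl⟩
    have h2 := hq.2
    rw [PySem.Set.contains_iff, PySem.Set.mem_ofList, hfx] at h2
    exact h2
  · rintro ⟨hxin, k, hg, hxl⟩
    obtain ⟨hk, hsp⟩ := List.getElem?_eq_some_iff.mp hg
    have h1 : PySem.Str.slice name none (some (k : Int)) = String.ofList (name.toList.take k) :=
      (pvStr_eq_iff_toList _ _).mpr (pvSlice_toList name k)
    have h2 : x = String.ofList (name.toList.take k) := (pvStr_eq_iff_toList _ _).mpr hxl
    have hfx : PySem.Str.slice name none (some (k : Int)) = x := h1.trans h2.symm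
    refine ⟨((0 : Int) + (k : Int), name.toList[k]), List.mem_filter.mpr ⟨?_, ?_⟩, ?_⟩
    · exact (PySem.List.mem_enumerate_iff _ 0 _).mpr ⟨k, hk, rfl⟩
    · simp only [zero_add]
      rw [Bool.and_eq_true, beq_iff_eq]
      refine ⟨hsp, ?_⟩
      rw [PySem.Set.contains_iff, PySem.Set.mem_ofList, hfx]
      exact hxin
    · simp only [zero_add]
      exact hfx

theorem pvPrefLoopE_eq (name : String) (so : List String) :
    pvPrefLoopE name (PySem.Set.ofList so) = pvObjectPrefix name so := by
  rw [pvPrefLoopE_eq_max, pvObjectPrefix, pvFirstWith_sorted_eq_max]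
  apply pvMax?_congr
  · intro x
    rw [pvPrefC_mem, pvPrefA_mem]
  · intro x hx y hy hkey
    obtain ⟨-, kx, -, hxl⟩ := (pvPrefC_mem name so x).mp hx
    obtain ⟨-, ky, -, hyl⟩ := (pvPrefA_mem name so y).mp hy
    have hxp : x.toList <+: name.toList := hxl ▸ List.take_prefix kx name.toList
    have hyp : y.toList <+: name.toList := hyl ▸ List.take_prefix ky name.toList
    have hlen : x.toList.length = y.toList.length := by
      have : (x.toList.length : Int) = (y.toList.length : Int) := by
        simpa [PySem.Str.len_eq] using hkey
      exact_mod_cast this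
    apply String.toList_inj.mp
    rw [List.prefix_iff_eq_take.mp hxp, List.prefix_iff_eq_take.mp hyp, hlen]

-- ---- B's embedded loop computes _object_for_intent_event ----

theorem pvSp_mem (name : String) (i : Int) :
    i ∈ (PySem.List.enumerate (" " ++ name ++ " ").toList).filterMap
        (fun ic => if ic.2 == ' ' then some ic.1 else none)
      ↔ ∃ k : Nat, (" " ++ name ++ " ").toList[k]? = some ' ' ∧ i = (k : Int) := by
  rw [List.mem_filterMap]
  constructor
  · rintro ⟨ic, hicm, hic⟩
    obtain ⟨k, hk, hick⟩ := (PySem.List.mem_enumerate_iff _ 0 _).mp hicm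
    subst hick
    simp only [zero_add] at hic
    rcases ite_eq_iff.mp hic with ⟨hc, hv⟩ | ⟨_, hv⟩
    · exact ⟨k, List.getElem?_eq_some_iff.mpr ⟨hk, beq_iff_eq.mp hc⟩,
        (Option.some_inj.mp hv).symm⟩
    · cases hv
  · rintro ⟨k, hg, hik⟩
    obtain ⟨hk, hsp⟩ := List.getElem?_eq_some_iff.mp hg
    refine ⟨((0 : Int) + (k : Int), (" " ++ name ++ " ").toList[k]),
      (PySem.List.mem_enumerate_iff _ 0 _).mpr ⟨k, hk, rfl⟩, ?_⟩
    rw [if_pos (beq_iff_eq.mpr hsp), hik]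
    simp

theorem pvCand_mem (name o : String) :
    o ∈ pvCandSet name
      ↔ ∃ k1 k2 : Nat, k1 < k2 ∧ (" " ++ name ++ " ").toList[k1]? = some ' ' ∧
          (" " ++ name ++ " ").toList[k2]? = some ' ' ∧
          o.toList = ((" " ++ name ++ " ").toList.drop (k1 + 1)).take (k2 - (k1 + 1)) := by
  unfold pvCandSet
  rw [PySem.Set.mem_ofList, List.mem_flatMap]
  constructor
  · rintro ⟨i, hi, ho⟩
    obtain ⟨k1, hg1, hik1⟩ := (pvSp_mem name i).mp hi
    obtain ⟨j, hj, hij⟩ := List.mem_filterMap.mp ho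
    obtain ⟨k2, hg2, hjk2⟩ := (pvSp_mem name j).mp hj
    subst hik1; subst hjk2
    rcases ite_eq_iff.mp hij with ⟨hc, hv⟩ | ⟨_, hv⟩
    · have hk12 : k1 < k2 := by exact_mod_cast hc
      refine ⟨k1, k2, hk12, hg1, hg2, ?_⟩
      have hcast : ((k1 : Int) + 1) = (((k1 + 1 : Nat)) : Int) := by push_cast; ring
      rw [hcast] at hv
      rw [← Option.some_inj.mp hv, pvSlice2_toList]
    · cases hv
  · rintro ⟨k1, k2, hk12, hg1, hg2, hol⟩
    refine ⟨(k1 : Int), (pvSp_mem name _).mpr ⟨k1, hg1, rfl⟩, List.mem_filterMap.mpr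
      ⟨(k2 : Int), (pvSp_mem name _).mpr ⟨k2, hg2, rfl⟩, ?_⟩⟩
    rw [if_pos (by exact_mod_cast hk12)]
    have hcast : ((k1 : Int) + 1) = (((k1 + 1 : Nat)) : Int) := by push_cast; ring
    rw [hcast]
    refine Option.some_inj.mpr ?_
    apply String.toList_inj.mp
    rw [pvSlice2_toList, hol]

theorem pvEmb_pred (name o : String) :
    PySem.Set.contains (pvCandSet name) o
      = PySem.Str.isIn (" " ++ o ++ " ") (" " ++ name ++ " ") := by
  rw [Bool.eq_iff_iff]
  rw [PySem.Str.isIn_eq, PySem.Chars.isIn_iff_infix,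
    show (" " ++ o ++ " ").toList = ' ' :: (o.toList ++ [' ']) from pvToList_wrap o,
    pvInfix_char]
  rw [PySem.Set.contains_iff, pvCand_mem]

theorem pvEmbLoopE_eq (name : String) (so : List String) :
    pvEmbLoopE name so = pvObjectForIntent name so := by
  rw [pvObjectForIntent, pvFirstWith_sorted_eq_max]
  unfold pvEmbLoopE
  have hstep : ∀ (emb : Option String), ∀ obj ∈ so,
      (if PySem.Set.contains (pvCandSet name) obj &&
          (match emb with | none => true | some b => decide (PySem.Str.len b < PySem.Str.len obj))
        then some obj else emb)
      = if PySem.Str.isIn (" " ++ obj ++ " ") (" " ++ name ++ " ")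
          then pvMaxStep emb obj else emb := by
    intro emb obj _
    rw [← pvEmb_pred]
    exact pvStepEq _ emb obj
  refine (PySem.List.foldl_congr_mem _ _ _ _ hstep).trans ?_
  rw [PySem.List.foldl_if_eq_foldl_filter
      (fun obj => PySem.Str.isIn (" " ++ obj ++ " ") (" " ++ name ++ " ")) pvMaxStep,
    ← pvMax?_eq_foldl]

-- ---- the full matcher, and A's main loops ----

def pvCombined (so : List String) (name : String) : Option String :=
  let obj := pvObjectPrefix name so
  if !pvTruthy obj && PySem.Str.endswith name "Button Clicked" then
    pvObjectForIntent name so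
  else obj

theorem pvObjectMatch_eq (name : String) (so : List String) :
    pvObjectMatch name so (PySem.Set.ofList so) = pvCombined so name := by
  rw [pvObjectMatch_eq_loops, pvPrefLoopE_eq, pvEmbLoopE_eq, pvCombined]

-- proof-side name for A's loop body (definitionally the lambda in rule_01)
def pvStepA (so : List String) (st : List String × PySem.Set String) (name : String) :
    List String × PySem.Set String :=
  let obj := pvObjectPrefix name so
  let obj := if !pvTruthy obj && PySem.Str.endswith name "Button Clicked" then
      pvObjectForIntent name so else obj
  if pvTruthy obj then (st.1, PySem.Set.add st.2 (obj.getD ""))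
  else if !PySem.Str.endswith name "Button Clicked" then (st.1 ++ [pvErrMsg name], st.2)
  else st

theorem pvStepA_eq (so : List String) (st : List String × PySem.Set String) (n : String) :
    pvStepA so st n =
      if pvTruthy (pvCombined so n) then
        (st.1, PySem.Set.add st.2 ((pvCombined so n).getD ""))
      else if !PySem.Str.endswith n "Button Clicked" then (st.1 ++ [pvErrMsg n], st.2)
      else st := rfl

-- A's main loop, characterised as the comprehensions of B
theorem pvLoopA' (so : List String) (ce : List String) (errs : List String)
    (fnd : PySem.Set String) :
    ce.foldl (pvStepA so) (errs, fnd)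
      = (errs ++ (ce.filter (fun n =>
            !pvTruthy (pvCombined so n) && !PySem.Str.endswith n "Button Clicked")).map pvErrMsg,
         (ce.filterMap (fun n =>
            if pvTruthy (pvCombined so n) then pvCombined so n else none)).foldl
           PySem.Set.add fnd) := by
  induction ce generalizing errs fnd with
  | nil => simp
  | cons n rest ih =>
    rw [List.foldl_cons, pvStepA_eq, List.filter_cons, List.filterMap_cons]
    cases ht : pvTruthy (pvCombined so n) with
    | true =>
      obtain ⟨s, hs⟩ : ∃ s, pvCombined so n = some s := by
        cases h : pvCombined so n
        · rw [h] at ht; simp [pvTruthy] at ht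
        · exact ⟨_, rfl⟩
      rw [hs] at ht ⊢
      simp only [if_true, Bool.not_true, Bool.false_and, Bool.false_eq_true, if_false,
        Option.getD_some]
      exact ih errs (PySem.Set.add fnd s)
    | false =>
      cases he : PySem.Str.endswith n "Button Clicked" with
      | true =>
        simp only [Bool.false_eq_true, if_false, Bool.not_true, Bool.not_false, Bool.and_false]
        exact ih errs fnd
      | false =>
        simp only [Bool.false_eq_true, if_false, Bool.not_false, if_true, Bool.and_true]
        rw [ih]
        simp

-- the same, with A's loop body written out (definitionally pvStepA)
theorem pvLoopA (so : List String) (ce : List String) (errs : List String)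
    (fnd : PySem.Set String) :
    ce.foldl (fun (st : List String × PySem.Set String) name =>
        let obj := pvObjectPrefix name so
        let obj := if !pvTruthy obj && PySem.Str.endswith name "Button Clicked" then
            pvObjectForIntent name so else obj
        if pvTruthy obj then (st.1, PySem.Set.add st.2 (obj.getD ""))
        else if !PySem.Str.endswith name "Button Clicked" then (st.1 ++ [pvErrMsg name], st.2)
        else st) (errs, fnd)
      = (errs ++ (ce.filter (fun n =>
            !pvTruthy (pvCombined so n) && !PySem.Str.endswith n "Button Clicked")).map pvErrMsg,
         (ce.filterMap (fun n =>
            if pvTruthy (pvCombined so n) then pvCombined so n else none)).foldl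
           PySem.Set.add fnd) :=
  pvLoopA' so ce errs fnd

-- the final warnings loop = B's filter/map comprehension
theorem pvWarnFold (fnd : PySem.Set String) (so : List String) :
    so.foldl (fun w obj =>
        if PySem.Set.contains fnd obj then w else w ++ [pvWarnMsg obj]) []
      = (so.filter (fun o => !PySem.Set.contains fnd o)).map pvWarnMsg := by
  have h : (fun (w : List String) obj =>
        if PySem.Set.contains fnd obj then w else w ++ [pvWarnMsg obj])
      = (fun w obj => if (!PySem.Set.contains fnd obj) = true then w ++ [pvWarnMsg obj] else w) := by
    funext w o; cases PySem.Set.contains fnd o <;> simp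
  rw [h, PySem.List.foldl_append_if]
  simp

-- ===== VERDICT (by name: the statement is the Claim_ definition above) =====
theorem rule_01_spec : Claim_equal_rule_01 := by
  intro ce so _
  show rule_01 ce so = rule_01_alt ce so
  unfold rule_01 rule_01_alt
  rw [pvLoopA so ce [] []]
  simp only [List.nil_append, pvObjectMatch_eq]
  rw [pvWarnFold, PySem.Set.ofList_eq_foldl, List.filterMap_map, List.filter_map, List.map_map]
  simp [Function.comp_def]
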